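-- pv_equiv track=rewrite | github.com/goldTigerP/A | A/S/server.py | TransToMsg
-- ===== SOURCE A (Python) =====
-- def TransToMsg(text):
--     msgs = []
--     i = 0
--     while i < len(text):
--         index = text.find("$", i)
--         if index == -1:
--             break
--         elif text.find(";", index) == -1:
--             break
--         else:
--             _text = text[index:text.find(";", index)]
--             msg = _text.split(",")
--             msgs.append(msg)
--             i = text.find(";", index)
--
--     return msgs
-- ===== SOURCE B (Python) =====
-- def TransToMsg(text):
--     # One pass over the ';'-terminated segments of a single split, instead of repeated find() scans.
--     return [seg[seg.find('$'):].split(',')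
--             for seg in text.split(';')[:-1]
--             if '$' in seg]
-- ===== Notes on version B (the rewrite author's own statement) =====
-- stated objective: simpler
-- what changed: Replaces the index-based while loop with repeated text.find calls by a single split on ';' (dropping the unterminated last piece) and a comprehension that keeps each segment containing '$' from its first '$' on.
import Mathlib
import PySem

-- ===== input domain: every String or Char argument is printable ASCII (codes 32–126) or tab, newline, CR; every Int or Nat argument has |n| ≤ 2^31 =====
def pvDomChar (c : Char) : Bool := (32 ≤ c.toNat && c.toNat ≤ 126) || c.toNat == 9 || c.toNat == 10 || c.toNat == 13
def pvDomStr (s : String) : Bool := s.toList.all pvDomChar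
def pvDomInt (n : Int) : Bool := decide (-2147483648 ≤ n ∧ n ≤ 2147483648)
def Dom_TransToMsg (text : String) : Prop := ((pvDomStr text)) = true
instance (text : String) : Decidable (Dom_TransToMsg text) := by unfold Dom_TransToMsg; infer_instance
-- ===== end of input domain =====

-- B replaces A's index-based while loop of repeated find() scans by one split on ';'
-- (dropping the unterminated last piece) and a comprehension over the segments: simpler,
-- same O(n) cost.

-- ===== PORT A =====
-- A's position i is modelled by the suffix of the text starting at i.  On that suffix:
--   text.find("$", i) == -1            ↔  '$' ∉ suffix            (break)
--   t := text[index:]                   =  suffix.dropWhile (· != '$')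
--   text.find(";", index) == -1        ↔  ';' ∉ t                 (break)
--   _text = text[index:text.find(";", index)]  =  t.takeWhile (· != ';')
--   new suffix (i = position of ';')    =  t.dropWhile (· != ';')
--   _text.split(",")                    =  List.splitOn ','  (exact for a one-char separator)
def TransToMsgLoop (cs : List Char) : List (List String) :=
  if h : '$' ∈ cs then
    let t := cs.dropWhile (· != '$')
    if h2 : ';' ∈ t then
      ((t.takeWhile (· != ';')).splitOn ',').map (fun p => String.ofList p)
        :: TransToMsgLoop (t.dropWhile (· != ';'))
    else []
  else []
termination_by cs.length
decreasing_by
  have ht : cs.dropWhile (· != '$') ≠ [] := by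
    intro hnil
    have := List.dropWhile_eq_nil_iff.mp hnil _ h
    simp at this
  have hhd := List.head_dropWhile_not (· != '$') ht
  obtain ⟨r, hr⟩ : ∃ r, cs.dropWhile (· != '$') = '$' :: r := by
    rcases he : cs.dropWhile (· != '$') with _ | ⟨c, r⟩
    · exact absurd he ht
    · refine ⟨r, ?_⟩
      simp only [he, List.head_cons] at hhd
      simp at hhd
      simp [hhd]
  have h1 : (cs.dropWhile (· != '$')).length ≤ cs.length := List.length_dropWhile_le _ _
  have h2 : ((cs.dropWhile (· != '$')).dropWhile (· != ';')).length
      ≤ r.length := by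
    rw [hr]
    simpa using List.length_dropWhile_le (· != ';') r
  rw [hr] at h1
  simp only [List.length_cons] at h1
  omega

def TransToMsg (text : String) : List (List String) :=
  TransToMsgLoop text.toList

-- ===== PORT B =====
-- text.split(';')  =  List.splitOn ';'  (exact for a one-char separator);  [:-1] = dropLast;
-- the comprehension with its 'if' filter is filterMap;  for '$' ∈ seg,
-- seg[seg.find('$'):]  =  seg.dropWhile (· != '$').
def TransToMsg_alt (text : String) : List (List String) :=
  (text.toList.splitOn ';').dropLast.filterMap fun seg =>
    if '$' ∈ seg then
      some (((seg.dropWhile (· != '$')).splitOn ',').map (fun p => String.ofList p))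
    else none

-- ===== PRECONDITION & SPEC =====
def Spec_TransToMsg (text : String) (out : List (List String)) : Prop := out = TransToMsg_alt text
instance (text : String) (out : List (List String)) : Decidable (Spec_TransToMsg text out) := by unfold Spec_TransToMsg; infer_instance

-- ===== CLAIM (what is proved, stated in full; the proofs are below) =====
def Claim_equal_TransToMsg : Prop := ∀ (text : String), Dom_TransToMsg text → Spec_TransToMsg text (TransToMsg text)

-- ===== LEMMAS AND PROOFS =====

-- B's per-segment transformation, named for the proofs.
def pvSegF (seg : List Char) : Option (List String) :=
  if '$' ∈ seg then
    some (((seg.dropWhile (· != '$')).splitOn ',').map (fun p => String.ofList p))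
  else none

lemma pvSplitOn_not_mem {cs : List Char} (h : ';' ∉ cs) : cs.splitOn ';' = [cs] := by
  induction cs with
  | nil => rfl
  | cons c cs ih =>
    have hc : c ≠ ';' := fun he => h (he ▸ List.mem_cons_self)
    have h' : ';' ∉ cs := fun hm => h (List.mem_cons_of_mem _ hm)
    show List.splitOnP (· == ';') (c :: cs) = [c :: cs]
    rw [List.splitOnP_cons]
    simp only [beq_iff_eq, hc, if_false]
    have : List.splitOnP (· == ';') cs = [cs] := ih h'
    rw [this]
    rfl

lemma pvSplitOn_append_cons {a b : List Char} (h : ';' ∉ a) :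
    (a ++ ';' :: b).splitOn ';' = a :: b.splitOn ';' := by
  induction a with
  | nil =>
    show List.splitOnP (· == ';') (';' :: b) = [] :: b.splitOn ';'
    rw [List.splitOnP_cons]; simp [List.splitOn]
  | cons c a ih =>
    have hc : c ≠ ';' := fun he => h (he ▸ List.mem_cons_self)
    have h' : ';' ∉ a := fun hm => h (List.mem_cons_of_mem _ hm)
    show List.splitOnP (· == ';') (c :: (a ++ ';' :: b)) = (c :: a) :: b.splitOn ';'
    rw [List.splitOnP_cons]
    simp only [beq_iff_eq, hc, if_false]
    have := ih h'
    rw [show ((a ++ ';' :: b).splitOnP (· == ';')) = a :: b.splitOn ';' from this]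
    rfl

-- A's loop skips everything before the first '$'.
lemma pvLoop_skip {a : List Char} (cs : List Char) (h : '$' ∉ a) :
    TransToMsgLoop (a ++ cs) = TransToMsgLoop cs := by
  have hmem : '$' ∈ a ++ cs ↔ '$' ∈ cs := by simp [List.mem_append, h]
  have hall : (a.dropWhile (· != '$')) = [] := by
    rw [List.dropWhile_eq_nil_iff]
    intro x hx
    simp only [bne_iff_ne, ne_eq]
    intro hxe; exact h (hxe ▸ hx)
  have hdrop : (a ++ cs).dropWhile (· != '$') = cs.dropWhile (· != '$') := by
    rw [List.dropWhile_append, hall]; rfl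
  rw [TransToMsgLoop, TransToMsgLoop]
  by_cases hc : '$' ∈ cs
  · simp only [hmem.mpr hc, hc, dif_pos, hdrop]
  · simp [hmem, hc]

lemma pvLoop_eq (cs : List Char) :
    TransToMsgLoop cs = (cs.splitOn ';').dropLast.filterMap pvSegF := by
  by_cases hsem : ';' ∈ cs
  · -- split cs at its first ';'
    set a := cs.takeWhile (· != ';') with ha
    have hne : cs.dropWhile (· != ';') ≠ [] := by
      intro hnil
      have := List.dropWhile_eq_nil_iff.mp hnil _ hsem
      simp at this
    obtain ⟨b, hb⟩ : ∃ b, cs.dropWhile (· != ';') = ';' :: b := by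
      have hhd := List.head_dropWhile_not (· != ';') hne
      rcases he : cs.dropWhile (· != ';') with _ | ⟨c, b⟩
      · exact absurd he hne
      · refine ⟨b, ?_⟩
        simp only [he, List.head_cons] at hhd
        simp at hhd
        simp [hhd]
    have hcs : cs = a ++ ';' :: b := by
      conv_lhs => rw [← List.takeWhile_append_dropWhile (p := (· != ';')) (l := cs)]
      rw [hb]
    have hna : ';' ∉ a := by
      intro hm
      have := List.mem_takeWhile_imp hm
      simp at this
    have hbl : b.length < cs.length := by
      rw [hcs]; simp; omega
    have ih := pvLoop_eq b
    -- RHS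
    have hsplit : (cs.splitOn ';').dropLast
        = a :: (b.splitOn ';').dropLast := by
      have hne2 : b.splitOn ';' ≠ [] := List.splitOnP_ne_nil _ _
      rw [hcs, pvSplitOn_append_cons hna, List.dropLast_cons_of_ne_nil hne2]
    by_cases hd : '$' ∈ a
    · -- a contributes a record; A reads it as takeWhile of the dropWhile suffix
      have hta : a.dropWhile (· != '$') ≠ [] := by
        intro hnil
        have := List.dropWhile_eq_nil_iff.mp hnil _ hd
        simp at this
      have hdrop : cs.dropWhile (· != '$') = a.dropWhile (· != '$') ++ ';' :: b := by
        rw [hcs, List.dropWhile_append]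
        simp [List.isEmpty_iff, hta]
      have hsub : ∀ x ∈ a.dropWhile (· != '$'), (x != ';') = true := by
        intro x hx
        have : x ∈ a := (List.dropWhile_sublist _).mem hx
        simp only [bne_iff_ne, ne_eq]
        intro hxe; exact hna (hxe ▸ this)
      have htake : (cs.dropWhile (· != '$')).takeWhile (· != ';')
          = a.dropWhile (· != '$') := by
        rw [hdrop, List.takeWhile_append]
        rw [List.takeWhile_eq_self_iff.mpr hsub]
        simp
      have hdrop2 : (cs.dropWhile (· != '$')).dropWhile (· != ';') = ';' :: b := by
        rw [hdrop, List.dropWhile_append]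
        rw [List.dropWhile_eq_nil_iff.mpr hsub]
        simp
      have hmem : '$' ∈ cs := by rw [hcs]; simp [hd]
      have hsem2 : ';' ∈ cs.dropWhile (· != '$') := by rw [hdrop]; simp
      rw [TransToMsgLoop]
      simp only [hmem, dif_pos, hsem2, dif_pos, htake, hdrop2]
      rw [show (';' :: b) = [';'] ++ b from rfl, pvLoop_skip b (by simp), ih,
        hsplit]
      simp [pvSegF, hd]
    · -- a contributes nothing and A skips it (and the ';')
      calc TransToMsgLoop cs = TransToMsgLoop b := by
            rw [hcs, show a ++ ';' :: b = (a ++ [';']) ++ b by simp]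
            exact pvLoop_skip (a := a ++ [';']) b (by simp [hd])
        _ = (b.splitOn ';').dropLast.filterMap pvSegF := ih
        _ = (cs.splitOn ';').dropLast.filterMap pvSegF := by
            rw [hsplit]; simp [pvSegF, hd]
  · -- no ';': both sides are empty
    have hsplit : (cs.splitOn ';').dropLast = [] := by
      rw [pvSplitOn_not_mem hsem]; rfl
    rw [TransToMsgLoop, hsplit]
    by_cases hd : '$' ∈ cs
    · have : ';' ∉ cs.dropWhile (· != '$') := fun hm =>
        hsem ((List.dropWhile_sublist _).mem hm)
      simp [hd, this]
    · simp [hd]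
termination_by cs.length

-- ===== VERDICT (by name: the statement is the Claim_ definition above) =====
theorem TransToMsg_spec : Claim_equal_TransToMsg := by
  intro text _
  show TransToMsg text = TransToMsg_alt text
  rw [TransToMsg, TransToMsg_alt, pvLoop_eq]
  rfl
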